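-- pv_equiv track=rewrite | github.com/Abdulmoiz781/pdf-rag | retriever.py | diversify_by_source
-- ===== SOURCE A (Python) =====
-- def diversify_by_source(chunks, scored_indices, top_k):
--     """
--     For BROAD multi-doc queries.
--     Guarantees at least 1 chunk per source PDF,
--     then fills remaining slots by score.
--     """
--     seen_sources = {}
--     first_pass, second_pass = [], []
--     for idx in scored_indices:
--         src = chunks[idx]["source"]
--         if src not in seen_sources:
--             seen_sources[src] = True
--             first_pass.append(idx)
--         else:
--             second_pass.append(idx)
--     return (first_pass + second_pass)[:top_k]
-- ===== SOURCE B (Python) =====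
-- def diversify_by_source(chunks, scored_indices, top_k):
--     # One pass builds a 0/1 first-occurrence flag per index, then a single
--     # stable sort keyed on that flag reorders first occurrences to the front.
--     seen = set()
--     keyed = []
--     for idx in scored_indices:
--         src = chunks[idx]["source"]
--         keyed.append((1 if src in seen else 0, idx))
--         seen.add(src)
--     return [idx for _, idx in sorted(keyed, key=lambda p: p[0])][:top_k]
-- ===== Notes on version B (the rewrite author's own statement) =====
-- stated objective: alternative
-- what changed: Replaces A's two explicit bucket lists (first_pass/second_pass built by branching) with a single pass that tags each index with a 0/1 first-occurrence flag followed by one stable sort on that flag; the reordered riffle emerges from the sort's stability instead of explicit list concatenation.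
import Mathlib
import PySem

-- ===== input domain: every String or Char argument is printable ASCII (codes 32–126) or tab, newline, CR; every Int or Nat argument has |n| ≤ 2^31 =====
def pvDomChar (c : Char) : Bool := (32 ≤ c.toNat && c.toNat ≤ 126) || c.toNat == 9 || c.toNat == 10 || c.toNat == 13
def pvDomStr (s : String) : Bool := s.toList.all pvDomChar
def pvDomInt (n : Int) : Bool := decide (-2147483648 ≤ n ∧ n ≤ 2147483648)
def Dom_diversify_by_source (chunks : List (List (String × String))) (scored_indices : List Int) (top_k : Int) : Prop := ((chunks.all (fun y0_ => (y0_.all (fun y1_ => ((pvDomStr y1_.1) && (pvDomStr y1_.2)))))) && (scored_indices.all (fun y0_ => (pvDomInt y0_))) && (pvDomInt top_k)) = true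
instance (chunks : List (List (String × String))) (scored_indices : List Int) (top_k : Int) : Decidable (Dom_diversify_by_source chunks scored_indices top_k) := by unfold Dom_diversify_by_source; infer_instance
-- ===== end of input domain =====

-- B replaces A's two explicit bucket lists with a 0/1 first-occurrence flag per index
-- and one stable sort on that flag (objective: alternative decomposition, same result).

-- chunks[idx]["source"], total form (Pre_ guarantees the lookups succeed)
def pvSrc (chunks : List (List (String × String))) (idx : Int) : String :=
  ((PySem.Dict.mk ((PySem.List.pyGet? chunks idx).getD [])).get? "source").getD ""

-- ===== PORT A =====
def diversify_by_source (chunks : List (List (String × String))) (scored_indices : List Int) (top_k : Int) : List Int :=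
  let st := scored_indices.foldl
    (fun (st : PySem.Dict String Bool × List Int × List Int) idx =>
      let src := pvSrc chunks idx
      if st.1.contains src = false then (st.1.insert src true, st.2.1 ++ [idx], st.2.2)
      else (st.1, st.2.1, st.2.2 ++ [idx]))
    (PySem.Dict.empty, [], [])
  PySem.List.slice (st.2.1 ++ st.2.2) none (some top_k)

-- ===== PORT B =====
def diversify_by_source_alt (chunks : List (List (String × String))) (scored_indices : List Int) (top_k : Int) : List Int :=
  let st := scored_indices.foldl
    (fun (st : PySem.Set String × List (Int × Int)) idx =>
      let src := pvSrc chunks idx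
      (PySem.Set.add st.1 src, st.2 ++ [(if PySem.Set.contains st.1 src then (1:Int) else 0, idx)]))
    (PySem.Set.empty, [])
  PySem.List.slice ((PySem.List.sorted st.2 (fun p => p.1)).map (fun p => p.2)) none (some top_k)

-- ===== PRECONDITION & SPEC =====
-- Pre_ excludes exactly the inputs where Python raises: an index outside chunks
-- (IndexError) or a chunk without a "source" key (KeyError).
def Pre_diversify_by_source (chunks : List (List (String × String))) (scored_indices : List Int) (top_k : Int) : Prop :=
  ∀ idx ∈ scored_indices, PySem.Raise.InRange chunks.length idx ∧
    (PySem.Dict.mk ((PySem.List.pyGet? chunks idx).getD [])).contains "source" = true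
instance (chunks : List (List (String × String))) (scored_indices : List Int) (top_k : Int) : Decidable (Pre_diversify_by_source chunks scored_indices top_k) := by unfold Pre_diversify_by_source; infer_instance
def pvWitness_diversify_by_source : (List (List (String × String))) × List Int × Int :=
  ([[("source", "a")], [("source", "b")]], [1, 0, 1], 2)

def Spec_diversify_by_source (chunks : List (List (String × String))) (scored_indices : List Int) (top_k : Int) (out : List Int) : Prop := out = diversify_by_source_alt chunks scored_indices top_k
instance (chunks : List (List (String × String))) (scored_indices : List Int) (top_k : Int) (out : List Int) : Decidable (Spec_diversify_by_source chunks scored_indices top_k out) := by unfold Spec_diversify_by_source; infer_instance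

-- ===== CLAIM (what is proved, stated in full; the proofs are below) =====
def Claim_equal_diversify_by_source : Prop := ∀ (chunks : List (List (String × String))) (scored_indices : List Int) (top_k : Int), Dom_diversify_by_source chunks scored_indices top_k → Pre_diversify_by_source chunks scored_indices top_k → Spec_diversify_by_source chunks scored_indices top_k (diversify_by_source chunks scored_indices top_k)

-- ===== LEMMAS AND PROOFS =====

-- the list of (first-occurrence flag, idx) pairs B's single pass produces
def pvFlags (chunks : List (List (String × String))) : List Int → PySem.Set String → List (Int × Int)
  | [], _ => []
  | idx :: t, s =>
      (if PySem.Set.contains s (pvSrc chunks idx) then (1:Int) else 0, idx) ::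
        pvFlags chunks t (PySem.Set.add s (pvSrc chunks idx))

lemma pvFlags_mem (chunks : List (List (String × String))) :
    ∀ (l : List Int) (s : PySem.Set String) (p : Int × Int),
      p ∈ pvFlags chunks l s → p.1 = 0 ∨ p.1 = 1 := by
  intro l
  induction l with
  | nil => intro s p h; simp [pvFlags] at h
  | cons idx t ih =>
      intro s p h
      simp only [pvFlags, List.mem_cons] at h
      rcases h with h | h
      · subst h; split_ifs <;> simp
      · exact ih _ p h

lemma foldB_snd (chunks : List (List (String × String))) :
    ∀ (l : List Int) (s : PySem.Set String) (acc : List (Int × Int)),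
      (l.foldl (fun (st : PySem.Set String × List (Int × Int)) idx =>
          (PySem.Set.add st.1 (pvSrc chunks idx), st.2 ++ [(if PySem.Set.contains st.1 (pvSrc chunks idx) then (1:Int) else 0, idx)]))
        (s, acc)).2 = acc ++ pvFlags chunks l s := by
  intro l
  induction l with
  | nil => intro s acc; simp [pvFlags]
  | cons idx t ih =>
      intro s acc
      simp only [List.foldl_cons, pvFlags]
      rw [ih]
      simp

lemma foldA_eq (chunks : List (List (String × String))) :
    ∀ (l : List Int) (d : PySem.Dict String Bool) (s : PySem.Set String),
      (∀ x, d.contains x = PySem.Set.contains s x) →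
      ∀ (zs os : List Int),
        (l.foldl (fun (st : PySem.Dict String Bool × List Int × List Int) idx =>
            if st.1.contains (pvSrc chunks idx) = false then (st.1.insert (pvSrc chunks idx) true, st.2.1 ++ [idx], st.2.2)
            else (st.1, st.2.1, st.2.2 ++ [idx]))
          (d, zs, os)).2
        = (zs ++ ((pvFlags chunks l s).filter (fun p => p.1 == 0)).map (fun p => p.2),
           os ++ ((pvFlags chunks l s).filter (fun p => !(p.1 == 0))).map (fun p => p.2)) := by
  intro l
  induction l with
  | nil => intro d s hds zs os; simp [pvFlags]
  | cons idx t ih =>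
      intro d s hds zs os
      simp only [List.foldl_cons, pvFlags]
      by_cases h : PySem.Set.contains s (pvSrc chunks idx) = true
      · -- already seen: flag 1, A takes the else branch, the set does not grow
        have hd : d.contains (pvSrc chunks idx) = true := (hds _).trans h
        have hadd : PySem.Set.add s (pvSrc chunks idx) = s := by
          simp only [PySem.Set.add, PySem.Set.contains]
          simp [List.mem_of_elem_eq_true h]
        rw [if_neg (by rw [hd]; simp), if_pos h, hadd, ih d s hds zs (os ++ [idx])]
        simp [List.filter_cons]
      · -- first occurrence: flag 0, A inserts into the dict, B adds to the set
        have h' : PySem.Set.contains s (pvSrc chunks idx) = false := by simpa using h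
        have hd : d.contains (pvSrc chunks idx) = false := (hds _).trans h'
        have hds' : ∀ x, (d.insert (pvSrc chunks idx) true).contains x
            = PySem.Set.contains (PySem.Set.add s (pvSrc chunks idx)) x := by
          intro x
          by_cases hx : x = pvSrc chunks idx
          · subst hx
            rw [PySem.Dict.contains_eq_isSome_get?, PySem.Dict.get?_insert_self]
            simp only [PySem.Set.add, PySem.Set.contains]
            by_cases hmem : pvSrc chunks idx ∈ s <;> simp [hmem]
          · rw [PySem.Dict.contains_eq_isSome_get?, PySem.Dict.get?_insert_of_ne d true hx,
                ← PySem.Dict.contains_eq_isSome_get?, hds x]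
            simp only [PySem.Set.add, PySem.Set.contains]
            by_cases hmem : pvSrc chunks idx ∈ s
            · simp [hmem]
            · simp [hmem]
              exact fun hh => absurd hh hx
        rw [if_pos hd, if_neg (by rw [h']; simp),
            ih (d.insert (pvSrc chunks idx) true) (PySem.Set.add s (pvSrc chunks idx)) hds' (zs ++ [idx]) os]
        simp [List.filter_cons]

lemma insertBy01 (p : Int × Int) :
    ∀ (zs os : List (Int × Int)), (∀ q ∈ zs, q.1 = 0) → (∀ q ∈ os, q.1 = 1) →
      (p.1 = 0 → PySem.List.insertBy (fun a b => decide (a.1 < b.1)) p (zs ++ os) = zs ++ p :: os) ∧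
      (p.1 = 1 → PySem.List.insertBy (fun a b => decide (a.1 < b.1)) p (zs ++ os) = (zs ++ os) ++ [p]) := by
  intro zs os hz ho
  constructor
  · intro hp0
    induction zs with
    | nil =>
        cases os with
        | nil => simp [PySem.List.insertBy]
        | cons o os' =>
            have : o.1 = 1 := ho o (by simp)
            simp [PySem.List.insertBy, hp0, this]
    | cons z zs' ih =>
        have hz0 : z.1 = 0 := hz z (by simp)
        have := ih (fun q hq => hz q (by simp [hq]))
        simp only [List.cons_append, PySem.List.insertBy, hp0, hz0]
        simp [this]
  · intro hp1
    apply PySem.List.insertBy_of_forall_not_before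
    intro y hy
    rcases List.mem_append.mp hy with hy | hy
    · have : y.1 = 0 := hz y hy
      simp [hp1, this]
    · have : y.1 = 1 := ho y hy
      simp [hp1, this]

lemma foldl_insertBy01 :
    ∀ (l zs os : List (Int × Int)), (∀ p ∈ l, p.1 = 0 ∨ p.1 = 1) →
      (∀ q ∈ zs, q.1 = 0) → (∀ q ∈ os, q.1 = 1) →
      l.foldl (fun acc p => PySem.List.insertBy (fun a b => decide ((a : Int × Int).1 < b.1)) p acc) (zs ++ os)
        = (zs ++ l.filter (fun p => p.1 == 0)) ++ (os ++ l.filter (fun p => !(p.1 == 0))) := by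
  intro l
  induction l with
  | nil => intro zs os _ _ _; simp
  | cons p t ih =>
      intro zs os hl hz ho
      have hp := hl p (by simp)
      simp only [List.foldl_cons]
      rcases hp with hp | hp
      · rw [(insertBy01 p zs os hz ho).1 hp]
        have : zs ++ p :: os = (zs ++ [p]) ++ os := by simp
        rw [this, ih (zs ++ [p]) os (fun q hq => hl q (by simp [hq]))
              (by intro q hq; rcases List.mem_append.mp hq with h | h
                  · exact hz q h
                  · simp at h; subst h; exact hp) ho]
        simp [hp]
      · rw [(insertBy01 p zs os hz ho).2 hp]
        have : (zs ++ os) ++ [p] = zs ++ (os ++ [p]) := by simp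
        rw [this, ih zs (os ++ [p]) (fun q hq => hl q (by simp [hq])) hz
              (by intro q hq; rcases List.mem_append.mp hq with h | h
                  · exact ho q h
                  · simp at h; subst h; exact hp)]
        simp [hp]

lemma sorted01 (l : List (Int × Int)) (hl : ∀ p ∈ l, p.1 = 0 ∨ p.1 = 1) :
    PySem.List.sorted l (fun p => p.1)
      = l.filter (fun p => p.1 == 0) ++ l.filter (fun p => !(p.1 == 0)) := by
  rw [PySem.List.sorted_eq_foldl_insertBy]
  simpa using foldl_insertBy01 l [] [] hl (by simp) (by simp)

-- ===== VERDICT (by name: the statement is the Claim_ definition above) =====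
theorem diversify_by_source_spec : Claim_equal_diversify_by_source := by
  intro chunks scored_indices top_k _ _
  unfold Spec_diversify_by_source diversify_by_source diversify_by_source_alt
  dsimp only
  rw [foldB_snd chunks scored_indices PySem.Set.empty []]
  rw [foldA_eq chunks scored_indices PySem.Dict.empty PySem.Set.empty
        (by intro x; simp [PySem.Set.empty, PySem.Set.contains]) [] []]
  simp only [List.nil_append]
  rw [sorted01 _ (pvFlags_mem chunks scored_indices PySem.Set.empty)]
  simp
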